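-- pv_equiv track=rewrite | github.com/john-science/mazelib | test/test_maze.py | _num_turns
-- ===== SOURCE A (Python) =====
-- def _num_turns(path):
--     """ helper method to count the number of turns in a path
--
--     Args:
--         path (list): sequence of cells to path through maze
--     Returns:
--         int: number of turns in the path
--     """
--     if len(path) < 3:
--         return 0
--
--     num = 0
--     for i in range(1, len(path) - 1):
--         same_col = path[i - 1][0] == path[i][0] == path[i + 1][0]
--         same_row = path[i - 1][1] == path[i][1] == path[i + 1][1]
--         if not same_row and not same_col:
--             num += 1
--
--     return num
-- ===== SOURCE B (Python) =====
-- def _num_turns(path):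
--     """Count turns by complement + inclusion-exclusion: count straight triples
--     (column-straight, row-straight, and fully-repeated = both) and subtract
--     them from the number of interior cells."""
--     triples = list(zip(path, path[1:], path[2:]))
--     col = sum(a[0] == b[0] == c[0] for a, b, c in triples)
--     row = sum(a[1] == b[1] == c[1] for a, b, c in triples)
--     both = sum(a == b == c for a, b, c in triples)
--     return len(triples) - col - row + both
-- ===== Notes on version B (the rewrite author's own statement) =====
-- stated objective: alternative
-- what changed: B counts the complement: it counts column-straight, row-straight and fully-repeated triples and recovers the number of turns by inclusion-exclusion (interior - col - row + both), instead of A's loop testing the turn condition per index.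
import Mathlib
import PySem

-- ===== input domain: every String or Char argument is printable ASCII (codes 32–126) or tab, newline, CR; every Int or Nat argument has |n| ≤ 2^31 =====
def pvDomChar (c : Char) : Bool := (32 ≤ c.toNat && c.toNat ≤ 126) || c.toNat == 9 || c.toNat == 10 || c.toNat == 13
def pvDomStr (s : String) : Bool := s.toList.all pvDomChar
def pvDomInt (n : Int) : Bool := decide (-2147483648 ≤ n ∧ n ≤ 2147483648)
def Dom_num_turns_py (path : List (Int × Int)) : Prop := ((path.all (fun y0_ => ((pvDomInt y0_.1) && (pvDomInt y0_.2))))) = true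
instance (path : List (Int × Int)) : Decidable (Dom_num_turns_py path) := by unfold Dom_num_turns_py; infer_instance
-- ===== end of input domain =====

-- B counts straight triples and recovers the turn count by inclusion-exclusion (alternative decomposition, same O(n) cost).

-- ===== PORT A =====
def num_turns_py (path : List (Int × Int)) : Int :=
  if path.length < 3 then 0
  else
    (PySem.List.pyRange 1 ((path.length : Int) - 1) 1).foldl (fun num i =>
      let pm := PySem.List.pyGetD path (i - 1) (0, 0)
      let pc := PySem.List.pyGetD path i (0, 0)
      let pp := PySem.List.pyGetD path (i + 1) (0, 0)
      let same_col := pm.1 == pc.1 && pc.1 == pp.1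
      let same_row := pm.2 == pc.2 && pc.2 == pp.2
      if !same_row && !same_col then num + 1 else num) 0

-- ===== PORT B =====
def num_turns_py_alt (path : List (Int × Int)) : Int :=
  let triples := (path.zip (path.drop 1)).zip (path.drop 2)
  let col := triples.countP (fun t => t.1.1.1 == t.1.2.1 && t.1.2.1 == t.2.1)
  let row := triples.countP (fun t => t.1.1.2 == t.1.2.2 && t.1.2.2 == t.2.2)
  let both := triples.countP (fun t => t.1.1 == t.1.2 && t.1.2 == t.2)
  (triples.length : Int) - (col : Int) - (row : Int) + (both : Int)

-- ===== PRECONDITION & SPEC =====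
def Spec_num_turns_py (path : List (Int × Int)) (out : Int) : Prop := out = num_turns_py_alt path
instance (path : List (Int × Int)) (out : Int) : Decidable (Spec_num_turns_py path out) := by unfold Spec_num_turns_py; infer_instance

-- ===== CLAIM (what is proved, stated in full; the proofs are below) =====
def Claim_equal_num_turns_py : Prop := ∀ (path : List (Int × Int)), Dom_num_turns_py path → Spec_num_turns_py path (num_turns_py path)

-- ===== LEMMAS AND PROOFS =====

-- a turn at the middle cell b of the consecutive triple a, b, c
def pvTurn (a b c : Int × Int) : Bool :=
  !(a.2 == b.2 && b.2 == c.2) && !(a.1 == b.1 && b.1 == c.1)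

-- reference count: structural recursion over consecutive triples
def pvCnt : List (Int × Int) → Nat
  | a :: b :: c :: rest => (if pvTurn a b c then 1 else 0) + pvCnt (b :: c :: rest)
  | _ => 0

-- A's loop test at index i, written over pyGetD
def pvQ (path : List (Int × Int)) (i : Int) : Bool :=
  let pm := PySem.List.pyGetD path (i - 1) (0, 0)
  let pc := PySem.List.pyGetD path i (0, 0)
  let pp := PySem.List.pyGetD path (i + 1) (0, 0)
  !(pm.2 == pc.2 && pc.2 == pp.2) && !(pm.1 == pc.1 && pc.1 == pp.1)

theorem pvRange_shift (a b : Int) :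
    PySem.List.pyRange (a + 1) (b + 1) 1 = (PySem.List.pyRange a b 1).map (fun i => i + 1) := by
  by_cases h : b ≤ a
  · rw [PySem.List.pyRange_one_eq_nil h, PySem.List.pyRange_one_eq_nil (by omega : b + 1 ≤ a + 1)]
    rfl
  · rw [PySem.List.pyRange_one_cons (show a < b by omega),
      PySem.List.pyRange_one_cons (show a + 1 < b + 1 by omega),
      pvRange_shift (a + 1) b]
    rfl
termination_by (b - a).toNat
decreasing_by omega

theorem pvGetD_cons_shift (x : Int × Int) (xs : List (Int × Int)) (j : Int)
    (h0 : 0 ≤ j) (h1 : j < (xs.length : Int)) :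
    PySem.List.pyGetD (x :: xs) (j + 1) (0, 0) = PySem.List.pyGetD xs j (0, 0) := by
  rw [PySem.List.pyGetD_eq_getElem (x :: xs) (0, 0) (by omega) (by simp; omega),
    PySem.List.pyGetD_eq_getElem xs (0, 0) h0 h1]
  have ht : (j + 1).toNat = j.toNat + 1 := by omega
  simp [ht]

theorem pvA_key : ∀ (l : List (Int × Int)) (a b : Int × Int),
    List.countP (pvQ (a :: b :: l))
      (PySem.List.pyRange 1 (((a :: b :: l).length : Int) - 1) 1) = pvCnt (a :: b :: l) := by
  intro l
  induction l with
  | nil =>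
    intro a b
    rw [PySem.List.pyRange_one_eq_nil (by simp)]
    simp [pvCnt]
  | cons c l ih =>
    intro a b
    have hlen : (((a :: b :: c :: l).length : Int) - 1) = ((l.length : Int) + 1) + 1 := by
      push_cast [List.length_cons]; ring
    rw [hlen, PySem.List.pyRange_one_cons (by omega), List.countP_cons,
      pvRange_shift 1 ((l.length : Int) + 1), List.countP_map]
    have hcongr : List.countP (pvQ (a :: b :: c :: l) ∘ fun i => i + 1)
        (PySem.List.pyRange 1 ((l.length : Int) + 1) 1)
        = List.countP (pvQ (b :: c :: l)) (PySem.List.pyRange 1 ((l.length : Int) + 1) 1) := by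
      apply List.countP_congr
      intro i hi
      have hb := PySem.List.mem_pyRange_one.mp hi
      have he : pvQ (a :: b :: c :: l) (i + 1) = pvQ (b :: c :: l) i := by
        unfold pvQ
        have e1 : i + 1 - 1 = (i - 1) + 1 := by ring
        rw [e1,
          pvGetD_cons_shift a _ (i - 1) (by omega) (by simp; omega),
          pvGetD_cons_shift a _ i (by omega) (by simp; omega),
          pvGetD_cons_shift a _ (i + 1) (by omega) (by simp; omega)]
      show (pvQ (a :: b :: c :: l) (i + 1) = true) ↔ _
      rw [he]
    have hq1 : pvQ (a :: b :: c :: l) 1 = pvTurn a b c := by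
      simp [pysem, pvQ, pvTurn]
    have ih' := ih b c
    have hrec : (((b :: c :: l).length : Int) - 1) = ((l.length : Int) + 1) := by
      push_cast [List.length_cons]; ring
    rw [hrec] at ih'
    rw [hcongr, ih', hq1]
    simp only [pvCnt]
    cases pvTurn a b c <;> simp [Nat.add_comm]

theorem pvA_eq_cnt : ∀ (path : List (Int × Int)), num_turns_py path = (pvCnt path : Int)
  | [] => by simp [num_turns_py, pvCnt]
  | [a] => by simp [num_turns_py, pvCnt]
  | [a, b] => by simp [num_turns_py, pvCnt]
  | a :: b :: c :: l => by
    unfold num_turns_py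
    rw [if_neg (by simp)]
    have hbody : (fun (num : Int) (i : Int) =>
        let pm := PySem.List.pyGetD (a :: b :: c :: l) (i - 1) (0, 0)
        let pc := PySem.List.pyGetD (a :: b :: c :: l) i (0, 0)
        let pp := PySem.List.pyGetD (a :: b :: c :: l) (i + 1) (0, 0)
        let same_col := pm.1 == pc.1 && pc.1 == pp.1
        let same_row := pm.2 == pc.2 && pc.2 == pp.2
        if !same_row && !same_col then num + 1 else num)
        = (fun (num : Int) (i : Int) => if pvQ (a :: b :: c :: l) i then num + 1 else num) := by
      funext num i
      simp [pvQ]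
    rw [hbody, PySem.List.foldl_if_add_one, pvA_key (c :: l) a b]
    simp

-- inclusion-exclusion over one list of triples
theorem pvIE : ∀ (T : List (((Int × Int) × (Int × Int)) × (Int × Int))),
    ((T.length : Int)
      - (T.countP (fun t => t.1.1.1 == t.1.2.1 && t.1.2.1 == t.2.1) : Int)
      - (T.countP (fun t => t.1.1.2 == t.1.2.2 && t.1.2.2 == t.2.2) : Int)
      + (T.countP (fun t => t.1.1 == t.1.2 && t.1.2 == t.2) : Int))
    = (T.countP (fun t => pvTurn t.1.1 t.1.2 t.2) : Int)
  | [] => by simp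
  | t :: T => by
    have ih := pvIE T
    have hturn : pvTurn t.1.1 t.1.2 t.2
        = (!(t.1.1.2 == t.1.2.2 && t.1.2.2 == t.2.2) && !(t.1.1.1 == t.1.2.1 && t.1.2.1 == t.2.1)) := rfl
    have hboth : (t.1.1 == t.1.2 && t.1.2 == t.2)
        = ((t.1.1.1 == t.1.2.1 && t.1.2.1 == t.2.1) && (t.1.1.2 == t.1.2.2 && t.1.2.2 == t.2.2)) := by
      obtain ⟨⟨⟨a1, a2⟩, b1, b2⟩, c1, c2⟩ := t
      cases h1 : (a1 == b1) <;> cases h2 : (a2 == b2) <;> cases h3 : (b1 == c1) <;>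
        cases h4 : (b2 == c2) <;> simp_all
    simp only [List.countP_cons, List.length_cons, hboth, hturn]
    cases h1 : (t.1.1.1 == t.1.2.1 && t.1.2.1 == t.2.1) <;>
      cases h2 : (t.1.1.2 == t.1.2.2 && t.1.2.2 == t.2.2) <;>
      simp only [h1, h2, Bool.not_true, Bool.not_false, Bool.and_true, Bool.and_false,
        Bool.true_and, Bool.false_and, Bool.and_self] <;>
      norm_num <;> push_cast <;> omega

-- the zipped triple list counts exactly the turns of pvCnt
theorem pvZipCnt : ∀ (path : List (Int × Int)),
    List.countP (fun t => pvTurn t.1.1 t.1.2 t.2)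
      ((path.zip (path.drop 1)).zip (path.drop 2)) = pvCnt path
  | [] => rfl
  | [_] => rfl
  | [_, _] => rfl
  | a :: b :: c :: l => by
    have hc : (((a :: b :: c :: l).zip ((a :: b :: c :: l).drop 1)).zip ((a :: b :: c :: l).drop 2))
        = ((a, b), c) :: (((b :: c :: l).zip ((b :: c :: l).drop 1)).zip ((b :: c :: l).drop 2)) := rfl
    rw [hc, List.countP_cons, pvZipCnt (b :: c :: l)]
    simp only [pvCnt]
    cases pvTurn a b c <;> simp [Nat.add_comm]

theorem pvAlt_eq_cnt (path : List (Int × Int)) :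
    num_turns_py_alt path = (pvCnt path : Int) := by
  unfold num_turns_py_alt
  rw [pvIE, pvZipCnt]

-- ===== VERDICT (by name: the statement is the Claim_ definition above) =====
theorem num_turns_py_spec : Claim_equal_num_turns_py := by
  intro path _
  show num_turns_py path = num_turns_py_alt path
  rw [pvA_eq_cnt, pvAlt_eq_cnt]
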